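-- pv_equiv track=rewrite | github.com/umangbhatia786/Python_Interview_Programs | reverese_2nd_internally.py | reverse_every_second_word_internally
-- ===== SOURCE A (Python) =====
-- def reverse_every_second_word_internally(input_string):
--     '''
--     Reverse every second word internally in a given string.
--
--     Parameters:
--     input_string (str): The input string to be processed.
--
--     Returns:
--     str: The input string with every second word reversed internally.
--     '''
--     # Split the input string into a list of words
--     word_list = input_string.split(" ")
--     new_word_list = list()
--
--     # Iterate through the list of words
--     for i in range(len(word_list)):
--         # Check if the word is at an even index
--         if i % 2 == 0:
--             new_word_list.append(word_list[i])  # Append the word as it is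
--         else:
--             new_word_list.append(word_list[i][::-1])  # Reverse the word and append
--
--     # Join the modified list of words back into a string
--     return ' '.join(new_word_list)
-- ===== SOURCE B (Python) =====
-- def reverse_every_second_word_internally(input_string):
--     '''Same result as A, by a different algorithm: a single character-level scan
--     of the raw string (no split, no join, no word list). A buffer collects the
--     current word; at each space the buffer is flushed as-is or reversed
--     according to a flag that flips at every space.'''
--     out = []
--     buf = []
--     odd = False
--     for ch in input_string:
--         if ch == ' ':
--             out.extend(reversed(buf) if odd else buf)
--             out.append(' ')
--             buf = []
--             odd = not odd
--         else:
--             buf.append(ch)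
--     out.extend(reversed(buf) if odd else buf)
--     return ''.join(out)
-- ===== Notes on version B (the rewrite author's own statement) =====
-- stated objective: alternative
-- what changed: Replaces A's split/index-loop/join pipeline (split into a word list, branch on i%2, join back) by a single character-level scan of the raw string with a word buffer and a flag that flips at each space; no word list, no index and no join are used.
import Mathlib
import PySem

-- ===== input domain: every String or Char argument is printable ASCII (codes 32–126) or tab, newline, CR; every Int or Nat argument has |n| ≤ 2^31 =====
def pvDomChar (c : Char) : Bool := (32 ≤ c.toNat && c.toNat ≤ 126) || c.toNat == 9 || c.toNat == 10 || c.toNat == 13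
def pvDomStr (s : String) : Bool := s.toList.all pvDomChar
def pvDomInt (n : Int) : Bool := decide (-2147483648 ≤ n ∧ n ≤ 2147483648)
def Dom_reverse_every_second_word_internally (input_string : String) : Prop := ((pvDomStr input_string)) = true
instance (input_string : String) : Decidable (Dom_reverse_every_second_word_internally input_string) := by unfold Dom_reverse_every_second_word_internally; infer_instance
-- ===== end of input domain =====

-- B replaces A's split / index-loop-with-parity-branch / join pipeline by a single
-- character-level scan of the raw string with a word buffer and a flag flipped at each
-- space (alternative decomposition, same cost).

-- ===== PORT A =====
-- the Python expression w[::-1] of A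
def pvRev (w : String) : String := (PySem.Str.slice? w none none (-1)).getD ""

def reverse_every_second_word_internally (input_string : String) : String :=
  -- word_list = input_string.split(" ")
  let word_list := (PySem.Str.split? input_string " ").getD []
  -- for i in range(len(word_list)): append word_list[i] as is (even i) or word_list[i][::-1] (odd i)
  let new_word_list := (PySem.List.pyRange 0 (word_list.length : Int) 1).foldl
    (fun acc i =>
      if PySem.Int.mod i 2 == 0 then acc ++ [PySem.List.pyGetD word_list i ""]
      else acc ++ [pvRev (PySem.List.pyGetD word_list i "")]) []
  PySem.Str.join " " new_word_list

-- ===== PORT B =====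
-- Source B's 'for ch in input_string' loop: out is the accumulator, buf the current word,
-- odd the flag flipped at every space; the final flush is the [] case.
def pvScan : List Char → List Char → Bool → List Char → List Char
  | [], buf, odd, out => out ++ (if odd then buf.reverse else buf)
  | ch :: rest, buf, odd, out =>
      if ch = ' ' then
        pvScan rest [] (!odd) (out ++ (if odd then buf.reverse else buf) ++ [' '])
      else
        pvScan rest (buf ++ [ch]) odd out

def reverse_every_second_word_internally_alt (input_string : String) : String :=
  String.ofList (pvScan input_string.toList [] false [])

-- ===== PRECONDITION & SPEC =====
def Spec_reverse_every_second_word_internally (input_string : String) (out : String) : Prop := out = reverse_every_second_word_internally_alt input_string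
instance (input_string : String) (out : String) : Decidable (Spec_reverse_every_second_word_internally input_string out) := by unfold Spec_reverse_every_second_word_internally; infer_instance

-- ===== CLAIM (what is proved, stated in full; the proofs are below) =====
def Claim_equal_reverse_every_second_word_internally : Prop := ∀ (input_string : String), Dom_reverse_every_second_word_internally input_string → Spec_reverse_every_second_word_internally input_string (reverse_every_second_word_internally input_string)

-- ===== LEMMAS AND PROOFS =====

-- split(" ") as a plain structural recursion (cur = current word so far, in order)
def splitD : List Char → List Char → List (List Char)
  | [], cur => [cur]
  | a :: rest, cur => if a = ' ' then cur :: splitD rest [] else splitD rest (cur ++ [a])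

lemma splitD_ne_nil (cs cur : List Char) : splitD cs cur ≠ [] := by
  induction cs generalizing cur with
  | nil => simp [splitD]
  | cons a rest ih => simp only [splitD]; split_ifs <;> simp [ih]

lemma go_spec : ∀ (fuel : Nat) (l cur : List Char) (acc : List (List Char)), l.length < fuel →
    PySem.Chars.splitOn.go [' '] fuel l cur acc = acc.reverse ++ splitD l cur.reverse := by
  intro fuel
  induction fuel with
  | zero => intro l cur acc h; omega
  | succ f ih =>
      intro l cur acc h
      cases l with
      | nil => rw [PySem.Chars.splitOn.go.eq_def]; simp [splitD]
      | cons a rest =>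
          by_cases ha : a = ' '
          · subst ha
            have hpre : List.isPrefixOf [' '] (' ' :: rest) = true := by
              simp [List.isPrefixOf]
            rw [PySem.Chars.splitOn.go.eq_def]
            simp only [hpre, if_pos, List.length_singleton, List.drop_one, List.tail_cons]
            rw [ih rest [] ((cur.reverse) :: acc) (by simpa using Nat.lt_of_succ_lt_succ h)]
            simp [splitD]
          · have hpre : List.isPrefixOf [' '] (a :: rest) = false := by
              simp [List.isPrefixOf]; exact fun hc => ha hc.symm
            rw [PySem.Chars.splitOn.go.eq_def]
            simp only [hpre, Bool.false_eq_true, if_false]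
            rw [ih rest (a :: cur) acc (by simpa using Nat.lt_of_succ_lt_succ h)]
            simp [splitD, ha]

lemma splitOn_eq_splitD (cs : List Char) : PySem.Chars.splitOn cs [' '] = splitD cs [] := by
  have := go_spec (cs.length + 1) cs [] [] (by omega)
  simpa [PySem.Chars.splitOn] using this

-- the word at parity 'odd': reversed on odd positions
def pvWd (w : List Char) (odd : Bool) : List Char := if odd then w.reverse else w

-- the expected output over the word list, with the parity of the first word
def pvInter : List (List Char) → Bool → List Char
  | [], _ => []
  | [w], odd => pvWd w odd
  | w :: w2 :: rest, odd => pvWd w odd ++ ' ' :: pvInter (w2 :: rest) (!odd)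

-- B's scan computes pvInter of splitD
lemma pvScan_spec : ∀ (cs buf : List Char) (odd : Bool) (out : List Char),
    pvScan cs buf odd out = out ++ pvInter (splitD cs buf) odd := by
  intro cs
  induction cs with
  | nil => intro buf odd out; simp [pvScan, splitD, pvInter, pvWd]
  | cons a rest ih =>
      intro buf odd out
      by_cases ha : a = ' '
      · subst ha
        simp only [pvScan, splitD, if_pos]
        rw [ih]
        rcases hsp : splitD rest [] with _ | ⟨p, ps⟩
        · exact absurd hsp (splitD_ne_nil rest [])
        · simp [pvInter, pvWd]
      · simp only [pvScan, if_neg ha, splitD]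
        rw [ih]

-- A's two-at-a-time word list (what A's indexed fold builds, proved below)
def pvPairs : List String → List String
  | [] => []
  | [a] => [a]
  | a :: b :: rest => a :: pvRev b :: pvPairs rest

lemma pvMod2 (a : Int) : PySem.Int.mod a 2 = a % 2 := by
  simp [PySem.Int.mod, Int.fmod_eq_emod]

-- A's indexed fold, in enumerate form, builds exactly pvPairs
lemma pvPairs_enumFold (ws : List String) : ∀ (s : Int), s % 2 = 0 → ∀ acc : List String,
    (PySem.List.enumerate ws s).foldl
      (fun acc p => if p.1 % 2 == 0 then acc ++ [p.2] else acc ++ [pvRev p.2]) acc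
      = acc ++ pvPairs ws := by
  induction ws using pvPairs.induct with
  | case1 => intro s _ acc; simp [pvPairs]
  | case2 a =>
      intro s hs acc
      simp [PySem.List.enumerate_cons, pvPairs, hs]
  | case3 a b rest ih =>
      intro s hs acc
      have h1 : (s + 1) % 2 = 1 := by omega
      have h2 : (s + 1 + 1) % 2 = 0 := by omega
      simp only [PySem.List.enumerate_cons, List.foldl_cons, hs, h1]
      simp only [ih (s + 1 + 1) h2]
      simp [pvPairs]

lemma toList_pvRev (w : String) : (pvRev w).toList = w.toList.reverse := by
  simp [pvRev, PySem.Str.slice?_none_none_neg_one]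

-- the char-list image of pvPairs
def pvPairsC : List (List Char) → List (List Char)
  | [] => []
  | [a] => [a]
  | a :: b :: rest => a :: b.reverse :: pvPairsC rest

lemma map_toList_pvPairs : ∀ ws : List String,
    (pvPairs ws).map String.toList = pvPairsC (ws.map String.toList) := by
  intro ws
  induction ws using pvPairs.induct with
  | case1 => simp [pvPairs, pvPairsC]
  | case2 a => simp [pvPairs, pvPairsC]
  | case3 a b rest ih => simp [pvPairs, pvPairsC, ih, toList_pvRev]

-- joining the pairwise-reversed words with ' ' is pvInter at even parity
lemma join_pvPairsC : ∀ parts : List (List Char),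
    PySem.Chars.join [' '] (pvPairsC parts) = pvInter parts false := by
  intro parts
  induction parts using pvPairsC.induct with
  | case1 => simp [pvPairsC, pvInter, PySem.Chars.join_nil]
  | case2 a => simp [pvPairsC, pvInter, pvWd, PySem.Chars.join_singleton]
  | case3 a b rest ih =>
      rcases rest with _ | ⟨r, rs⟩
      · simp [pvPairsC, pvInter, pvWd, PySem.Chars.join_cons_cons, PySem.Chars.join_singleton]
      · obtain ⟨t, ht⟩ : ∃ t, pvPairsC (r :: rs) = r :: t := by
          rcases rs with _ | ⟨r2, rs2⟩ <;> simp [pvPairsC]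
        calc PySem.Chars.join [' '] (pvPairsC (a :: b :: r :: rs))
            = a ++ [' '] ++ (b.reverse ++ [' '] ++ PySem.Chars.join [' '] (pvPairsC (r :: rs))) := by
              rw [show pvPairsC (a :: b :: r :: rs) = a :: b.reverse :: pvPairsC (r :: rs) from rfl,
                ht, PySem.Chars.join_cons_cons, PySem.Chars.join_cons_cons, ← ht]
          _ = pvInter (a :: b :: r :: rs) false := by
              rw [ih]
              simp [pvInter, pvWd]

-- ===== VERDICT (by name: the statement is the Claim_ definition above) =====
theorem reverse_every_second_word_internally_spec : Claim_equal_reverse_every_second_word_internally := by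
  intro input_string _
  unfold Spec_reverse_every_second_word_internally
  unfold reverse_every_second_word_internally reverse_every_second_word_internally_alt
  set cs := input_string.toList with hcs
  have htl : (" " : String).toList = [' '] := rfl
  -- the word list A splits into
  have hsplit : (PySem.Str.split? input_string " ").getD []
      = (splitD cs []).map String.ofList := by
    simp [PySem.Str.split?, PySem.Chars.split?, htl, splitOn_eq_splitD, hcs]
  set ws := (PySem.Str.split? input_string " ").getD [] with hws
  -- A's fold is pvPairs ws
  have hmap := PySem.List.enumerate_eq_map_pyRange ws ""
  have key := pvPairs_enumFold ws 0 rfl []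
  rw [hmap, List.foldl_map] at key
  simp only [List.nil_append, PySem.List.len_eq] at key
  simp only [pvMod2]
  rw [key]
  -- both sides as String.ofList of char-level computations
  rw [pvScan_spec]
  simp only [PySem.Str.join, htl]
  rw [map_toList_pvPairs]
  rw [show ws = (splitD cs []).map String.ofList from hsplit]
  rw [List.map_map]
  have hid : (splitD cs []).map (String.toList ∘ String.ofList) = splitD cs [] := by
    simp [Function.comp_def]
  rw [hid, join_pvPairsC, List.nil_append]
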